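-- pv_equiv track=rewrite | github.com/vgc/vgc-dev-tools | count_lines.py | handleCStyleComment
-- ===== SOURCE A (Python) =====
-- def handleCStyleComment(line, within):
--     line = line.rstrip('\\ ') # Strip trailing backslach to handle comments in macros
--     hasCode = False
--     i = 0
--     while i < len(line):
--         if within:
--             if line[i:i+2] == '*/':
--                 within = False
--                 i += 2
--             else:
--                 i += 1
--         else:
--             if line[i:i+2] == '/*':
--                 within = True
--                 i += 2
--             else:
--                 hasCode = True
--                 i += 1
--     return hasCode, within
-- ===== SOURCE B (Python) =====
-- def handleCStyleComment(line, within):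
--     line = line.rstrip('\\ ')  # Strip trailing backslash to handle comments in macros
--     hasCode = False
--     i = 0
--     n = len(line)
--     while True:
--         if within:
--             j = line.find('*/', i)
--             if j == -1:
--                 break
--             within = False
--             i = j + 2
--         else:
--             j = line.find('/*', i)
--             if j == -1:
--                 if i < n:
--                     hasCode = True
--                 break
--             if j > i:
--                 hasCode = True
--             within = True
--             i = j + 2
--     return hasCode, within
-- ===== Notes on version B (the rewrite author's own statement) =====
-- stated objective: alternative
-- what changed: Replaces A's per-character while loop (inspecting line[i:i+2] at every index) with a loop that jumps between delimiter occurrences via substring search: line.find('*/', i) while inside a comment and line.find('/*', i) while in code, setting hasCode only when characters lie strictly before the found '/*' or fill the tail.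
import Mathlib
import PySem

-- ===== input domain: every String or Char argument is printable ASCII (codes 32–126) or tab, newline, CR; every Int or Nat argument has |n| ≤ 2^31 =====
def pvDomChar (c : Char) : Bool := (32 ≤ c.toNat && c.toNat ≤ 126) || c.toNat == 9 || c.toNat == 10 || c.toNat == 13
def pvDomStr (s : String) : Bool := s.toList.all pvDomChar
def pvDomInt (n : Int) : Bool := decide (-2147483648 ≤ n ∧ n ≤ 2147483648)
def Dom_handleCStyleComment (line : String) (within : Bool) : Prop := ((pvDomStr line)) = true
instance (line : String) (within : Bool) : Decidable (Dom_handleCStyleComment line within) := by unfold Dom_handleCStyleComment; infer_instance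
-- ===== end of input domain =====

-- B replaces A's per-character while loop by jumping between '*/' / '/*' delimiter occurrences
-- found by substring search (objective: alternative decomposition; same asymptotic cost).

-- line.rstrip('\\ ') — shared preamble of both Pythons; hand-ported (exact: drops trailing '\' and ' ')
def rstripBS (s : List Char) : List Char :=
  ((s.reverse.dropWhile (fun c => c = '\\' || c = ' ')).reverse)

-- ===== PORT A =====
-- A's while loop inspects line[i:i+2] at each i; the remaining suffix line[i:] is the
-- recursion state, so checking line[i:i+2] is checking the first two chars of the suffix.
def goA : List Char → Bool → Bool → Bool × Bool
  | [], hasCode, within => (hasCode, within)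
  | [_], hasCode, within => if within then (hasCode, within) else (true, within)
  | c :: c2 :: rest, hasCode, within =>
      if within then
        if c = '*' ∧ c2 = '/' then goA rest hasCode false
        else goA (c2 :: rest) hasCode within
      else
        if c = '/' ∧ c2 = '*' then goA rest hasCode true
        else goA (c2 :: rest) true within

def handleCStyleComment (line : String) (within : Bool) : Bool × Bool :=
  goA (rstripBS line.toList) false within

-- ===== PORT B =====
-- line.find(ab, i): first index ≥ i of the two-char delimiter; the position i is represented
-- by the remaining suffix line[i:], so the result is (j - i, line[j+2:]) (none = -1).
def findDelim (a b : Char) : List Char → Option (Nat × List Char)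
  | [] => none
  | [_] => none
  | c :: c2 :: rest =>
      if c = a ∧ c2 = b then some (0, rest)
      else match findDelim a b (c2 :: rest) with
        | none => none
        | some (k, r) => some (k + 1, r)

theorem findDelim_length_lt {a b : Char} : ∀ {s : List Char} {k : Nat} {r : List Char},
    findDelim a b s = some (k, r) → r.length < s.length := by
  intro s
  induction s with
  | nil => intro k r h; simp [findDelim] at h
  | cons c t ih =>
      intro k r h
      cases t with
      | nil => simp [findDelim] at h
      | cons c2 rest =>
          rw [findDelim] at h
          split at h
          · cases h; simp
          · cases hf : findDelim a b (c2 :: rest) with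
            | none => rw [hf] at h; simp at h
            | some p =>
                rw [hf] at h
                cases h
                have := ih (k := p.1) (r := p.2) (by rw [hf])
                simpa using Nat.lt_succ_of_lt this

-- B's loop: while within, jump to the next '*/'; while not within, jump to the next '/*',
-- recording hasCode when non-comment characters lie before it (j > i) or fill the tail (i < n).
def goB (s : List Char) (hasCode within : Bool) : Bool × Bool :=
  if within then
    match h : findDelim '*' '/' s with
    | none => (hasCode, within)
    | some (_, r) => goB r hasCode false
  else
    match h : findDelim '/' '*' s with
    | none => (if s.isEmpty then hasCode else true, within)
    | some (k, r) => goB r (hasCode || decide (0 < k)) true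
termination_by s.length
decreasing_by all_goals exact findDelim_length_lt h

def handleCStyleComment_alt (line : String) (within : Bool) : Bool × Bool :=
  goB (rstripBS line.toList) false within

-- ===== PRECONDITION & SPEC =====
def Spec_handleCStyleComment (line : String) (within : Bool) (out : Bool × Bool) : Prop := out = handleCStyleComment_alt line within
instance (line : String) (within : Bool) (out : Bool × Bool) : Decidable (Spec_handleCStyleComment line within out) := by unfold Spec_handleCStyleComment; infer_instance

-- ===== CLAIM (what is proved, stated in full; the proofs are below) =====
def Claim_equal_handleCStyleComment : Prop := ∀ (line : String) (within : Bool), Dom_handleCStyleComment line within → Spec_handleCStyleComment line within (handleCStyleComment line within)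

-- ===== LEMMAS AND PROOFS =====

-- characterisation of A's scan in comment state: it runs to the first '*/' (or the end)
theorem goA_within : ∀ (s : List Char) (h : Bool),
    goA s h true = match findDelim '*' '/' s with
      | none => (h, true)
      | some (_, r) => goA r h false := by
  intro s
  induction s with
  | nil => intro h; simp [goA, findDelim]
  | cons c t ih =>
      intro h
      cases t with
      | nil => simp [goA, findDelim]
      | cons c2 rest =>
          rw [goA, findDelim]
          by_cases hc : c = '*' ∧ c2 = '/'
          · simp [hc]
          · simp only [if_neg hc, if_true]
            rw [ih h]
            cases hf : findDelim '*' '/' (c2 :: rest) <;> simp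

-- characterisation of A's scan in code state: it runs to the first '/*' (or the end),
-- setting hasCode iff it stepped over at least one character
theorem goA_code : ∀ (s : List Char) (h : Bool),
    goA s h false = match findDelim '/' '*' s with
      | none => ((if s.isEmpty then h else true), false)
      | some (k, r) => goA r (h || decide (0 < k)) true := by
  intro s
  induction s with
  | nil => intro h; simp [goA, findDelim]
  | cons c t ih =>
      intro h
      cases t with
      | nil => simp [goA, findDelim]
      | cons c2 rest =>
          rw [goA, findDelim]
          by_cases hc : c = '/' ∧ c2 = '*'
          · simp [hc]
          · simp only [if_neg hc]
            rw [ih true]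
            cases hf : findDelim '/' '*' (c2 :: rest) with
            | none => simp
            | some p => simp

theorem goA_eq_goB_aux : ∀ (n : Nat) (s : List Char), s.length < n → ∀ (h w : Bool), goA s h w = goB s h w := by
  intro n
  induction n with
  | zero => intro s hs; omega
  | succ n ih =>
      intro s hs h w
      cases w with
      | true =>
          rw [goA_within, goB]
          simp only [if_true]
          cases hf : findDelim '*' '/' s with
          | none => rfl
          | some p =>
              have hlt := findDelim_length_lt (a := '*') (b := '/') (k := p.1) (r := p.2) (by rw [hf])
              exact ih p.2 (by omega) h false
      | false =>
          rw [goA_code, goB]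
          simp only [Bool.false_eq_true, if_false]
          cases hf : findDelim '/' '*' s with
          | none => rfl
          | some p =>
              have hlt := findDelim_length_lt (a := '/') (b := '*') (k := p.1) (r := p.2) (by rw [hf])
              exact ih p.2 (by omega) (h || decide (0 < p.1)) true

theorem goA_eq_goB (s : List Char) (h w : Bool) : goA s h w = goB s h w :=
  goA_eq_goB_aux (s.length + 1) s (Nat.lt_succ_self _) h w

-- ===== VERDICT (by name: the statement is the Claim_ definition above) =====
theorem handleCStyleComment_spec : Claim_equal_handleCStyleComment := by
  intro line within _
  unfold Spec_handleCStyleComment handleCStyleComment handleCStyleComment_alt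
  exact goA_eq_goB _ _ _
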